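-- pv_equiv track=rewrite | github.com/boyshen/leetcode_Algorithm_problem | 529.扫雷游戏/updateBoard.py | update_board1
-- ===== SOURCE A (Python) =====
-- def update_board1(board, click):
--     """
--     DFS.  时间复杂度为 O(m*n), 空间复杂度为 O(m*n)
--     :param board: (list[list[str]])
--     :param click: (list[int])
--     :return: (list[list[str]])
--     """
--
--     direction = [(0, 1), (1, 0), (-1, 0), (0, -1), (1, 1), (-1, -1), (-1, 1), (1, -1)]
--     row, col = len(board), len(board[0])
--     x, y = click[0], click[1]
--
--     if 0 <= x < row and 0 <= y < col:
--         if board[x][y] == 'M':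
--             board[x][y] = 'X'
--         else:
--             # 搜索周边是不是有地雷
--             count = 0
--             for (r, c) in direction:
--                 if 0 <= x + r < row and 0 <= y + c < col:
--                     if board[x + r][y + c] == 'M':
--                         count += 1
--
--             # 如果周边有地雷，则更新。否则为 'B'
--             if count != 0:
--                 board[x][y] = str(count)
--             else:
--                 board[x][y] = 'B'
--                 for (r, c) in direction:
--                     if 0 <= x + r < row and 0 <= y + c < col and board[x + r][y + c] == 'E':
--                         update_board1(board, (x + r, y + c))
--     return board
-- ===== SOURCE B (Python) =====
-- def update_board1(board, click):
--     """Iterative flood fill with an explicit stack instead of recursion.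
--     Mutates board in place like the original and returns it."""
--     directions = [(0, 1), (1, 0), (-1, 0), (0, -1), (1, 1), (-1, -1), (-1, 1), (1, -1)]
--     row, col = len(board), len(board[0])
--     x, y = click[0], click[1]
--
--     if not (0 <= x < row and 0 <= y < col):
--         return board
--     if board[x][y] == 'M':
--         board[x][y] = 'X'
--         return board
--
--     def resolve(i, j):
--         """Resolve one non-mine cell; return the neighbours to visit next."""
--         n = sum(1 for r, c in directions
--                 if 0 <= i + r < len(board) and 0 <= j + c < len(board[0])
--                 and board[i + r][j + c] == 'M')
--         if n != 0:
--             board[i][j] = str(n)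
--             return []
--         board[i][j] = 'B'
--         return [(i + r, j + c) for r, c in reversed(directions)]
--
--     stack = resolve(x, y)
--     while stack:
--         i, j = stack.pop()
--         if 0 <= i < len(board) and 0 <= j < len(board[0]) and board[i][j] == 'E':
--             stack.extend(resolve(i, j))
--     return board
-- ===== Notes on version B (the rewrite author's own statement) =====
-- stated objective: alternative
-- what changed: Replaced A's recursive DFS flood fill (which recurses on each blank 'E' neighbour) by an iterative explicit-stack loop with a resolve helper: pop a cell, re-check it is still 'E', count adjacent mines, write the digit or 'B', and push its neighbours; same in-place mutation and identical return value.
-- outside the precondition, e.g. on update_board1([['M', 'E'], ['E']], [0, 0]): A returns [['X', 'E'], ['E']], B returns [['X', 'E'], ['E']]; on update_board1([['E', 'M'], ['M']], [0, 1]): A returns [['E', 'X'], ['M']], B returns [['E', 'X'], ['M']]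
import Mathlib
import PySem

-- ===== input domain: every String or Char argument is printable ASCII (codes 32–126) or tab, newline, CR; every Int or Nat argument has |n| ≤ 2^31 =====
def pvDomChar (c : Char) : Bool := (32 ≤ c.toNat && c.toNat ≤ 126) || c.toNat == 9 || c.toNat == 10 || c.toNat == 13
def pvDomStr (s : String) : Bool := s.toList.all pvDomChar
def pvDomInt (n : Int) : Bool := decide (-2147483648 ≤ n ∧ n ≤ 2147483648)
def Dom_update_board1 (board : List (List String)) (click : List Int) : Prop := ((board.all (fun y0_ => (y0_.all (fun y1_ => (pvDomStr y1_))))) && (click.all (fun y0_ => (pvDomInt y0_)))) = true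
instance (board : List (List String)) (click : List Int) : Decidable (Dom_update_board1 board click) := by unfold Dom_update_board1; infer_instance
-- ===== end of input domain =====

-- B replaces A's recursive DFS by an explicit-stack loop (pop a cell, resolve it, push its
-- neighbours); same mutation of the board, same return value. Both A and B mutate `board`
-- in place in Python; the equivalence proved here is about the return value.

-- shared primitives (Python's board indexing / assignment, used by both ports)
def pvDirs : List (Int × Int) := [(0,1),(1,0),(-1,0),(0,-1),(1,1),(-1,-1),(-1,1),(1,-1)]
def pvCol (b : List (List String)) : Nat := (b.headD []).length
def pvCell (b : List (List String)) (x y : Int) : String :=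
  (PySem.List.pyGet? ((PySem.List.pyGet? b x).getD []) y).getD ""
def pvSet (b : List (List String)) (x y : Int) (v : String) : List (List String) :=
  b.modify x.toNat (fun r => r.set y.toNat v)

-- ===== PORT A =====
-- fuelled transliteration of A's recursion; the top call passes fuel that provably
-- suffices (each recursive call consumes one currently-'E' cell), so fuel 0 is dead code.
def updA : Nat → List (List String) → Int → Int → List (List String)
  | 0, b, _, _ => b
  | f+1, b, x, y =>
    let rw : Int := b.length
    let cl : Int := pvCol b
    if 0 ≤ x ∧ x < rw ∧ 0 ≤ y ∧ y < cl then
      if pvCell b x y = "M" then pvSet b x y "X"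
      else
        let count : Int := pvDirs.foldl (fun n d =>
          if 0 ≤ x + d.1 ∧ x + d.1 < rw ∧ 0 ≤ y + d.2 ∧ y + d.2 < cl then
            (if pvCell b (x + d.1) (y + d.2) = "M" then n + 1 else n)
          else n) 0
        if count ≠ 0 then pvSet b x y (PySem.Int.toStr count)
        else
          pvDirs.foldl (fun bb d =>
            if (0 ≤ x + d.1 ∧ x + d.1 < rw ∧ 0 ≤ y + d.2 ∧ y + d.2 < cl) ∧
                pvCell bb (x + d.1) (y + d.2) = "E" then
              updA f bb (x + d.1) (y + d.2)
            else bb) (pvSet b x y "B")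
    else b

def update_board1 (board : List (List String)) (click : List Int) : List (List String) :=
  updA (board.flatten.length + 1) board
    ((PySem.List.pyGet? click 0).getD 0) ((PySem.List.pyGet? click 1).getD 0)

-- ===== PORT B =====
-- B's helper `resolve`: count adjacent mines, write the digit or 'B', return neighbours to
-- push (Source B pushes reversed(directions) and pops from the END, so pop order = pvDirs
-- order; the head of the returned list is the next cell popped).
def pvMineCount (b : List (List String)) (x y : Int) : Int :=
  pvDirs.foldl (fun n d =>
    if 0 ≤ x + d.1 ∧ x + d.1 < (b.length : Int) ∧ 0 ≤ y + d.2 ∧ y + d.2 < (pvCol b : Int) ∧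
        pvCell b (x + d.1) (y + d.2) = "M" then n + 1 else n) 0

def pvResolve (b : List (List String)) (x y : Int) : List (List String) × List (Int × Int) :=
  let n := pvMineCount b x y
  if n ≠ 0 then (pvSet b x y (PySem.Int.toStr n), [])
  else (pvSet b x y "B", pvDirs.map (fun d => (x + d.1, y + d.2)))

-- B's while-loop, structurally recursive on fuel; the caller passes fuel that provably
-- suffices (pvLoop_eq_W below shows the loop never exhausts it): pop, re-check the cell is
-- still unresolved ('E'), resolve it, push its neighbours
def pvLoop : Nat -> List (List String) -> List (Int × Int) -> List (List String)
  | 0, b, _ => b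
  | _ + 1, b, [] => b
  | f + 1, b, (i, j) :: rest =>
    if 0 ≤ i ∧ i < (b.length : Int) ∧ 0 ≤ j ∧ j < (pvCol b : Int) ∧ pvCell b i j = "E" then
      pvLoop f (pvResolve b i j).1 ((pvResolve b i j).2 ++ rest)
    else pvLoop f b rest

def update_board1_alt (board : List (List String)) (click : List Int) : List (List String) :=
  let rw : Int := board.length
  let cl : Int := pvCol board
  let x := (PySem.List.pyGet? click 0).getD 0
  let y := (PySem.List.pyGet? click 1).getD 0
  if 0 ≤ x ∧ x < rw ∧ 0 ≤ y ∧ y < cl then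
    if pvCell board x y = "M" then pvSet board x y "X"
    else pvLoop (8 * board.flatten.length + 8) (pvResolve board x y).1 (pvResolve board x y).2
  else board

-- ===== PRECONDITION & SPEC =====
-- Pre_ excludes exactly the inputs where A raises: empty board or click of length < 2
-- (IndexError on board[0] / click[1]), and boards whose clicked position is in bounds while
-- some row is shorter than row 0 (a neighbour access board[i][j] with j < len(board[0]) can
-- then raise IndexError); it also excludes some such ragged boards on which A happens to
-- return (flood fill never reaches a short row) — B returns the same value there (see cites).
def Pre_update_board1 (board : List (List String)) (click : List Int) : Prop :=
  board ≠ [] ∧ 2 ≤ click.length ∧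
  ((0 ≤ (PySem.List.pyGet? click 0).getD 0 ∧ (PySem.List.pyGet? click 0).getD 0 < (board.length : Int) ∧
    0 ≤ (PySem.List.pyGet? click 1).getD 0 ∧ (PySem.List.pyGet? click 1).getD 0 < (pvCol board : Int)) →
   ∀ r ∈ board, pvCol board ≤ r.length)
instance (board : List (List String)) (click : List Int) : Decidable (Pre_update_board1 board click) := by
  unfold Pre_update_board1; infer_instance

def pvWitness_update_board1 : List (List String) × List Int :=
  ([["E", "E", "E"], ["E", "E", "E"], ["E", "M", "E"]], [0, 0])

def Spec_update_board1 (board : List (List String)) (click : List Int) (out : List (List String)) : Prop := out = update_board1_alt board click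
instance (board : List (List String)) (click : List Int) (out : List (List String)) : Decidable (Spec_update_board1 board click out) := by unfold Spec_update_board1; infer_instance

-- ===== CLAIM (what is proved, stated in full; the proofs are below) =====
def Claim_equal_update_board1 : Prop := ∀ (board : List (List String)) (click : List Int), Dom_update_board1 board click → Pre_update_board1 board click → Spec_update_board1 board click (update_board1 board click)

-- ===== LEMMAS AND PROOFS =====

-- number of 'E' cells: the measure that drives all the induction below
def pvMu (b : List (List String)) : Nat := b.flatten.count "E"

-- counting lemmas for pvMu
theorem pvCount_set_le (r : List String) (m : Nat) (v : String) (hv : v ≠ "E") :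
    (r.set m v).count "E" ≤ r.count "E" := by
  by_cases hm : m < r.length
  · rw [List.count_set hm]
    have : (v == "E") = false := by simpa using hv
    simp [this]
  · rw [List.set_eq_of_length_le (by omega)]

theorem pvCount_set_lt (r : List String) (m : Nat) (v : String) (hv : v ≠ "E")
    (hE : r[m]? = some "E") :
    (r.set m v).count "E" < r.count "E" := by
  have hm : m < r.length := by
    by_contra h
    rw [List.getElem?_eq_none (by omega)] at hE; simp at hE
  have hmem : "E" ∈ r := by
    obtain ⟨h, hh⟩ := List.getElem?_eq_some_iff.mp hE
    exact hh ▸ List.getElem_mem h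
  have hcnt : 1 ≤ r.count "E" := List.one_le_count_iff.mpr hmem
  rw [List.count_set hm]
  have hv' : (v == "E") = false := by simpa using hv
  have hEE : (r[m] == "E") = true := by
    obtain ⟨h, hh⟩ := List.getElem?_eq_some_iff.mp hE
    simp [hh]
  simp [hv', hEE]
  omega

theorem pvMu_modify_le (v : String) (hv : v ≠ "E") :
    ∀ (b : List (List String)) (k m : Nat),
    ((b.modify k (fun r => r.set m v)).flatten.count "E") ≤ b.flatten.count "E" := by
  intro b
  induction b with
  | nil => intro k m; simp
  | cons r b ih =>
    intro k m
    cases k with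
    | zero => simp [List.count_append]; have := pvCount_set_le r m v hv; omega
    | succ k => simp [List.count_append]; have := ih k m; omega

theorem pvMu_modify_lt (v : String) (hv : v ≠ "E") :
    ∀ (b : List (List String)) (k m : Nat),
    b[k]?.bind (fun r => r[m]?) = some "E" →
    ((b.modify k (fun r => r.set m v)).flatten.count "E") < b.flatten.count "E" := by
  intro b
  induction b with
  | nil => intro k m h; simp at h
  | cons r b ih =>
    intro k m h
    cases k with
    | zero =>
      simp at h
      simp [List.count_append]
      have := pvCount_set_lt r m v hv h
      omega
    | succ k =>
      simp at h
      simp [List.count_append]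
      have := ih k m (by simpa using h)
      omega

theorem pvCell_some (b : List (List String)) (x y : Int) (hx : 0 ≤ x) (hy : 0 ≤ y)
    (h : pvCell b x y = "E") :
    b[x.toNat]?.bind (fun r => r[y.toNat]?) = some "E" := by
  unfold pvCell at h
  rw [PySem.List.pyGet?_of_nonneg _ hx] at h
  cases hb : b[x.toNat]? with
  | none => rw [hb] at h; simp [PySem.List.pyGet?] at h
  | some r =>
    rw [hb] at h
    simp only [Option.getD_some] at h
    rw [PySem.List.pyGet?_of_nonneg _ hy] at h
    cases hr : r[y.toNat]? with
    | none => rw [hr] at h; simp at h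
    | some s => rw [hr] at h; simp at h; simp [hb, hr, h]

theorem pvMu_set_le (b : List (List String)) (x y : Int) (v : String) (hv : v ≠ "E") :
    pvMu (pvSet b x y v) ≤ pvMu b :=
  pvMu_modify_le v hv b x.toNat y.toNat

theorem pvMu_set_lt (b : List (List String)) (x y : Int) (v : String) (hv : v ≠ "E")
    (hx : 0 ≤ x) (hy : 0 ≤ y) (hE : pvCell b x y = "E") :
    pvMu (pvSet b x y v) < pvMu b :=
  pvMu_modify_lt v hv b x.toNat y.toNat (pvCell_some b x y hx hy hE)

theorem pvFoldl_count_bounds {β : Type} (g : Int → β → Int)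
    (hg : ∀ n d, g n d = n ∨ g n d = n + 1) :
    ∀ (l : List β) (a : Int), a ≤ List.foldl g a l ∧ List.foldl g a l ≤ a + l.length := by
  intro l
  induction l with
  | nil => intro a; simp
  | cons x l ih =>
    intro a
    obtain ⟨h1, h2⟩ := ih (g a x)
    rcases hg a x with h | h <;>
      (rw [List.foldl_cons, List.length_cons]; rw [h] at h1 h2 ⊢; push_cast; omega)

theorem pvMineCount_bounds (b : List (List String)) (x y : Int) :
    0 ≤ pvMineCount b x y ∧ pvMineCount b x y ≤ 8 := by
  unfold pvMineCount
  obtain ⟨h1, h2⟩ := pvFoldl_count_bounds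
    (fun n (d : Int × Int) =>
      if 0 ≤ x + d.1 ∧ x + d.1 < (b.length : Int) ∧ 0 ≤ y + d.2 ∧ y + d.2 < (pvCol b : Int) ∧
          pvCell b (x + d.1) (y + d.2) = "M" then n + 1 else n)
    (by intro n d; simp only []; split_ifs <;> simp) pvDirs 0
  exact ⟨h1, le_trans h2 (by decide)⟩

theorem pvToStr_ne_E (n : Int) (h1 : 1 ≤ n) (h2 : n ≤ 8) : PySem.Int.toStr n ≠ "E" := by
  interval_cases n <;> decide

theorem pvMu_resolve_lt (b : List (List String)) (x y : Int)
    (hx : 0 ≤ x) (hy : 0 ≤ y) (hE : pvCell b x y = "E") :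
    pvMu (pvResolve b x y).1 < pvMu b := by
  have hb := pvMineCount_bounds b x y
  unfold pvResolve
  by_cases h : pvMineCount b x y = 0
  · rw [if_neg (by simpa using h)]
    exact pvMu_set_lt b x y _ (by decide) hx hy hE
  · rw [if_pos h]
    exact pvMu_set_lt b x y _ (pvToStr_ne_E _ (by omega) hb.2) hx hy hE

-- proof-side ideal loop (no fuel): pvLoop with sufficient fuel computes exactly this
def pvLoopW (b : List (List String)) (st : List (Int × Int)) : List (List String) :=
  match st with
  | [] => b
  | (i, j) :: rest =>
    if h : 0 ≤ i ∧ i < (b.length : Int) ∧ 0 ≤ j ∧ j < (pvCol b : Int) ∧ pvCell b i j = "E" then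
      pvLoopW (pvResolve b i j).1 ((pvResolve b i j).2 ++ rest)
    else pvLoopW b rest
termination_by (pvMu b, st.length)
decreasing_by
  · exact Prod.Lex.left _ _ (pvMu_resolve_lt b i j h.1 h.2.2.1 h.2.2.2.2)
  · exact Prod.Lex.right _ (by simp)

theorem pvResolve_snd_len (b : List (List String)) (x y : Int) :
    (pvResolve b x y).2.length ≤ 8 := by
  unfold pvResolve
  by_cases h : pvMineCount b x y = 0
  · rw [if_neg (by simpa using h)]; simp [pvDirs]
  · rw [if_pos h]; simp

theorem pvMu_resolve_le (b : List (List String)) (x y : Int) :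
    pvMu (pvResolve b x y).1 ≤ pvMu b := by
  have hb := pvMineCount_bounds b x y
  unfold pvResolve
  by_cases h : pvMineCount b x y = 0
  · rw [if_neg (by simpa using h)]
    exact pvMu_set_le b x y _ (by decide)
  · rw [if_pos h]
    exact pvMu_set_le b x y _ (pvToStr_ne_E _ (by omega) hb.2)

-- with enough fuel the fueled loop is the ideal loop
theorem pvLoop_eq_W : ∀ (f : Nat) (b : List (List String)) (st : List (Int × Int)),
    8 * pvMu b + st.length ≤ f → pvLoop f b st = pvLoopW b st := by
  intro f
  induction f with
  | zero =>
    intro b st h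
    have hst : st = [] := by cases st <;> simp_all
    subst hst
    rw [pvLoopW]
    rfl
  | succ f ih =>
    intro b st h
    cases st with
    | nil => rw [pvLoopW]; rfl
    | cons p rest =>
      obtain ⟨i, j⟩ := p
      rw [pvLoopW]
      by_cases hg : 0 ≤ i ∧ i < (b.length : Int) ∧ 0 ≤ j ∧ j < (pvCol b : Int) ∧
          pvCell b i j = "E"
      · rw [pvLoop, if_pos hg, dif_pos hg]
        refine ih _ _ ?_
        have h1 := pvMu_resolve_lt b i j hg.1 hg.2.2.1 hg.2.2.2.2
        have h2 := pvResolve_snd_len b i j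
        simp only [List.length_append, List.length_cons] at *
        omega
      · rw [pvLoop, if_neg hg, dif_neg hg]
        refine ih _ _ ?_
        simp only [List.length_cons] at h
        omega


theorem pvMu_pos_of_cell (b : List (List String)) (x y : Int) (hx : 0 ≤ x) (hy : 0 ≤ y)
    (hE : pvCell b x y = "E") : 1 ≤ pvMu b := by
  have h := pvCell_some b x y hx hy hE
  cases hb : b[x.toNat]? with
  | none => rw [hb] at h; simp at h
  | some r =>
    rw [hb] at h; simp at h
    have hr : "E" ∈ r := by
      obtain ⟨hh, he⟩ := List.getElem?_eq_some_iff.mp h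
      exact he ▸ List.getElem_mem hh
    have : "E" ∈ b.flatten := List.mem_flatten.mpr ⟨r, List.mem_of_getElem? hb, hr⟩
    exact List.one_le_count_iff.mpr this

-- A's nested-if mine count equals B's single-condition mine count
theorem pvCountA_eq (b : List (List String)) (x y : Int) :
    pvDirs.foldl (fun n d =>
      if 0 ≤ x + d.1 ∧ x + d.1 < (b.length : Int) ∧ 0 ≤ y + d.2 ∧ y + d.2 < (pvCol b : Int) then
        (if pvCell b (x + d.1) (y + d.2) = "M" then n + 1 else n)
      else n) 0 = pvMineCount b x y := by
  unfold pvMineCount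
  apply List.foldl_ext
  intro a d _
  by_cases h1 : 0 ≤ x + d.1 ∧ x + d.1 < (b.length : Int) ∧ 0 ≤ y + d.2 ∧ y + d.2 < (pvCol b : Int)
  · by_cases h2 : pvCell b (x + d.1) (y + d.2) = "M"
    · rw [if_pos h1, if_pos h2, if_pos ⟨h1.1, h1.2.1, h1.2.2.1, h1.2.2.2, h2⟩]
    · rw [if_pos h1, if_neg h2, if_neg (by tauto)]
  · rw [if_neg h1, if_neg (by tauto)]

theorem pvSet_length (b : List (List String)) (x y : Int) (v : String) :
    (pvSet b x y v).length = b.length := by simp [pvSet]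

theorem pvSet_col (b : List (List String)) (x y : Int) (v : String) :
    pvCol (pvSet b x y v) = pvCol b := by
  unfold pvCol pvSet
  cases b with
  | nil => simp
  | cons r b =>
    cases h : x.toNat with
    | zero => simp
    | succ k => simp

theorem pvFoldl_inv {α β : Type} (P : α → Prop) (step : α → β → α) :
    ∀ (l : List β) (a : α), P a → (∀ a d, P a → P (step a d)) → P (List.foldl step a l) := by
  intro l
  induction l with
  | nil => intro a ha _; simpa
  | cons d l ih => intro a ha hs; exact ih _ (hs a d ha) hs

theorem updA_shape : ∀ (f : Nat) (b : List (List String)) (x y : Int),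
    (updA f b x y).length = b.length ∧ pvCol (updA f b x y) = pvCol b := by
  intro f
  induction f with
  | zero => intro b x y; exact ⟨rfl, rfl⟩
  | succ f ih =>
    intro b x y
    simp only [updA]
    split_ifs with h1 h2 h3
    · exact ⟨pvSet_length b x y _, pvSet_col b x y _⟩
    · exact ⟨pvSet_length b x y _, pvSet_col b x y _⟩
    · refine pvFoldl_inv (fun bb => bb.length = b.length ∧ pvCol bb = pvCol b) _ pvDirs _
        ⟨pvSet_length b x y _, pvSet_col b x y _⟩ ?_
      intro bb d hbb
      split_ifs with hg
      · exact ⟨((ih bb _ _).1).trans hbb.1, ((ih bb _ _).2).trans hbb.2⟩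
      · exact hbb
    · exact ⟨rfl, rfl⟩

theorem pvMu_updA_le : ∀ (f : Nat) (b : List (List String)) (x y : Int),
    pvMu (updA f b x y) ≤ pvMu b := by
  intro f
  induction f with
  | zero => intro b x y; exact le_refl _
  | succ f ih =>
    intro b x y
    simp only [updA]
    split_ifs with h1 h2 h3
    · exact pvMu_set_le b x y "X" (by decide)
    · rw [pvCountA_eq] at h3 ⊢
      have hb := pvMineCount_bounds b x y
      exact pvMu_set_le b x y _ (pvToStr_ne_E _ (by omega) hb.2)
    · refine pvFoldl_inv (fun bb => pvMu bb ≤ pvMu b) _ pvDirs _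
        (pvMu_set_le b x y "B" (by decide)) ?_
      intro bb d hbb
      split_ifs with hg
      · exact le_trans (ih bb _ _) hbb
      · exact hbb
    · exact le_refl _

theorem pvLoopW_nil (b : List (List String)) : pvLoopW b [] = b := by rw [pvLoopW]

theorem pvLoopW_cons_pos (b : List (List String)) (i j : Int) (rest : List (Int × Int))
    (hg : 0 ≤ i ∧ i < (b.length : Int) ∧ 0 ≤ j ∧ j < (pvCol b : Int) ∧ pvCell b i j = "E") :
    pvLoopW b ((i, j) :: rest) = pvLoopW (pvResolve b i j).1 ((pvResolve b i j).2 ++ rest) := by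
  rw [pvLoopW, dif_pos hg]

theorem pvLoopW_cons_neg (b : List (List String)) (i j : Int) (rest : List (Int × Int))
    (hg : ¬(0 ≤ i ∧ i < (b.length : Int) ∧ 0 ≤ j ∧ j < (pvCol b : Int) ∧ pvCell b i j = "E")) :
    pvLoopW b ((i, j) :: rest) = pvLoopW b rest := by
  rw [pvLoopW, dif_neg hg]

-- the simulation of A's neighbour fold by B's stack segment
theorem pv_fold_sim (f : Nat)
    (H : ∀ (b : List (List String)) (x y : Int) (st : List (Int × Int)),
      pvMu b ≤ f → 0 ≤ x → x < (b.length : Int) → 0 ≤ y → y < (pvCol b : Int) →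
      pvCell b x y = "E" →
      pvLoopW (pvResolve b x y).1 ((pvResolve b x y).2 ++ st) = pvLoopW (updA f b x y) st)
    (L C x y : Int) :
    ∀ (ds : List (Int × Int)) (bb : List (List String)) (st : List (Int × Int)),
    pvMu bb ≤ f → (bb.length : Int) = L → (pvCol bb : Int) = C →
    pvLoopW bb ((ds.map (fun d => (x + d.1, y + d.2))) ++ st)
      = pvLoopW (ds.foldl (fun bb d =>
          if (0 ≤ x + d.1 ∧ x + d.1 < L ∧ 0 ≤ y + d.2 ∧ y + d.2 < C) ∧
              pvCell bb (x + d.1) (y + d.2) = "E" then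
            updA f bb (x + d.1) (y + d.2)
          else bb) bb) st := by
  intro ds
  induction ds with
  | nil => intro bb st _ _ _; simp
  | cons d ds ih =>
    intro bb st hmu hL hC
    simp only [List.map_cons, List.cons_append, List.foldl_cons]
    by_cases hg : (0 ≤ x + d.1 ∧ x + d.1 < L ∧ 0 ≤ y + d.2 ∧ y + d.2 < C) ∧
        pvCell bb (x + d.1) (y + d.2) = "E"
    · rw [pvLoopW_cons_pos bb (x + d.1) (y + d.2) _
        ⟨hg.1.1, by omega, hg.1.2.2.1, by omega, hg.2⟩]
      rw [H bb (x + d.1) (y + d.2) _ hmu hg.1.1 (by omega) hg.1.2.2.1 (by omega) hg.2]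
      rw [if_pos hg]
      exact ih (updA f bb (x + d.1) (y + d.2)) st
        (le_trans (pvMu_updA_le f bb _ _) hmu)
        (by rw [(updA_shape f bb _ _).1]; exact hL)
        (by rw [(updA_shape f bb _ _).2]; exact hC)
    · rw [pvLoopW_cons_neg bb (x + d.1) (y + d.2) _
        (fun hG => hg ⟨⟨hG.1, by omega, hG.2.2.1, by omega⟩, hG.2.2.2.2⟩)]
      rw [if_neg hg]
      exact ih bb st hmu hL hC

-- main simulation: resolving one 'E' cell and draining its pushed neighbours equals A's
-- recursive call on that cell
theorem pv_main : ∀ (f : Nat) (b : List (List String)) (x y : Int) (st : List (Int × Int)),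
    pvMu b ≤ f → 0 ≤ x → x < (b.length : Int) → 0 ≤ y → y < (pvCol b : Int) →
    pvCell b x y = "E" →
    pvLoopW (pvResolve b x y).1 ((pvResolve b x y).2 ++ st) = pvLoopW (updA f b x y) st := by
  intro f
  induction f with
  | zero =>
    intro b x y st hmu hx hxl hy hyl hE
    have := pvMu_pos_of_cell b x y hx hy hE
    omega
  | succ f ih =>
    intro b x y st hmu hx hxl hy hyl hE
    simp only [updA]
    rw [if_pos ⟨hx, hxl, hy, hyl⟩]
    rw [if_neg (by simp [hE])]
    rw [pvCountA_eq]
    unfold pvResolve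
    by_cases hn : pvMineCount b x y = 0
    · rw [if_neg (by simpa using hn), if_neg (by simpa using hn)]
      simp only []
      have hmu1 : pvMu (pvSet b x y "B") ≤ f := by
        have := pvMu_set_lt b x y "B" (by decide) hx hy hE
        omega
      exact pv_fold_sim f ih (b.length : Int) (pvCol b : Int) x y pvDirs
        (pvSet b x y "B") st hmu1 (pvSet_length b x y "B" ▸ rfl) (pvSet_col b x y "B" ▸ rfl)
    · rw [if_pos hn, if_pos hn]
      simp only [List.nil_append]

-- ===== VERDICT (by name: the statement is the Claim_ definition above) =====
theorem update_board1_spec : Claim_equal_update_board1 := by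
  unfold Claim_equal_update_board1 Spec_update_board1
  intro board click _ _
  unfold update_board1 update_board1_alt
  simp only [updA]
  by_cases hb : 0 ≤ (PySem.List.pyGet? click 0).getD 0 ∧
      (PySem.List.pyGet? click 0).getD 0 < (board.length : Int) ∧
      0 ≤ (PySem.List.pyGet? click 1).getD 0 ∧
      (PySem.List.pyGet? click 1).getD 0 < (pvCol board : Int)
  · rw [if_pos hb, if_pos hb]
    set x := (PySem.List.pyGet? click 0).getD 0 with hxdef
    set y := (PySem.List.pyGet? click 1).getD 0 with hydef
    by_cases hm : pvCell board x y = "M"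
    · rw [if_pos hm, if_pos hm]
    · rw [if_neg hm, if_neg hm]
      have hfuel : 8 * pvMu (pvResolve board x y).1 + (pvResolve board x y).2.length
          ≤ 8 * board.flatten.length + 8 := by
        have h1 := pvMu_resolve_le board x y
        have h2 : pvMu board ≤ board.flatten.length := List.count_le_length
        have h3 := pvResolve_snd_len board x y
        omega
      rw [pvLoop_eq_W _ _ _ hfuel]
      rw [pvCountA_eq]
      unfold pvResolve
      by_cases hn : pvMineCount board x y = 0
      · rw [if_neg (by simpa using hn), if_neg (by simpa using hn)]
        simp only []
        have hmu1 : pvMu (pvSet board x y "B") ≤ board.flatten.length := by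
          have h1 := pvMu_set_le board x y "B" (by decide)
          have h2 : pvMu board ≤ board.flatten.length := List.count_le_length
          omega
        have := pv_fold_sim board.flatten.length (pv_main board.flatten.length)
          (board.length : Int) (pvCol board : Int) x y pvDirs
          (pvSet board x y "B") [] hmu1
          (pvSet_length board x y "B" ▸ rfl) (pvSet_col board x y "B" ▸ rfl)
        rw [List.append_nil] at this
        rw [pvLoopW_nil] at this
        exact this.symm
      · rw [if_pos hn, if_pos hn]
        rw [pvLoopW_nil]
  · rw [if_neg hb, if_neg hb]
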